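-- pv_equiv track=rewrite | github.com/danielle-elsey/Chem_GA_Project | src/GA_dipole.py | construct_polymer_string
-- ===== SOURCE A (Python) =====
-- def construct_polymer_string(polymer, smiles_list, poly_size):
--     '''
--     Construction of polymer from monomers, adds standard end groups [amino and nitro]
--
--     Parameters
--     ---------
--     polymer: list (specific format)
--         [(#,#,#,#), A, B]
--     smiles_list: list
--         list of monomer SMILES
--     poly_size: int
--         number of monomers per polymer
--
--     Returns
--     -------
--     poly_string: str
--         polymer SMILES string
--     '''
--     poly_string = ''
--
--     #add amino end group
--     poly_string = poly_string + "N"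
--
--     cycle = 0
--     # loop over total monomers in each polymer
--     for i in range(poly_size):
--         # cycle over monomer sequence until total number of monomers is reached
--         seq_cycle_location = i - cycle * (len(polymer[0]))
--         seq_monomer_index = polymer[0][seq_cycle_location]
--         if seq_cycle_location == (len(polymer[0]) - 1):
--             cycle += 1
--         # find index in polymer of monomer index (from smiles_list) from given sequence value
--         monomer_index = polymer[seq_monomer_index + 1]
--         poly_string = poly_string + smiles_list[monomer_index]
--
--     #add nitro end group
--     poly_string = poly_string + "N(=O)=O"
--
--     return poly_string
-- ===== SOURCE B (Python) =====
-- def construct_polymer_string(polymer, smiles_list, poly_size):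
--     '''Simpler rebuild: per-position pieces for one sequence cycle, then repeat with divmod
--     instead of tracking a running cycle counter and per-monomer concatenation.'''
--     seq = polymer[0]
--     n = poly_size if poly_size > 0 else 0
--     if n == 0:
--         return "N" + "N(=O)=O"
--     pieces = [smiles_list[polymer[s + 1]] for s in seq[:min(n, len(seq))]]
--     full, rem = divmod(n, len(seq))
--     body = "".join(pieces) * full + "".join(pieces[:rem])
--     return "N" + body + "N(=O)=O"
-- ===== Notes on version B (the rewrite author's own statement) =====
-- stated objective: alternative
-- what changed: Replaces A's per-monomer loop with a hand-maintained cycle counter and repeated string concatenation by building the SMILES pieces of one sequence cycle once, then assembling the body with divmod: full-cycle string repetition plus a joined remainder prefix.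
import Mathlib
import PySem

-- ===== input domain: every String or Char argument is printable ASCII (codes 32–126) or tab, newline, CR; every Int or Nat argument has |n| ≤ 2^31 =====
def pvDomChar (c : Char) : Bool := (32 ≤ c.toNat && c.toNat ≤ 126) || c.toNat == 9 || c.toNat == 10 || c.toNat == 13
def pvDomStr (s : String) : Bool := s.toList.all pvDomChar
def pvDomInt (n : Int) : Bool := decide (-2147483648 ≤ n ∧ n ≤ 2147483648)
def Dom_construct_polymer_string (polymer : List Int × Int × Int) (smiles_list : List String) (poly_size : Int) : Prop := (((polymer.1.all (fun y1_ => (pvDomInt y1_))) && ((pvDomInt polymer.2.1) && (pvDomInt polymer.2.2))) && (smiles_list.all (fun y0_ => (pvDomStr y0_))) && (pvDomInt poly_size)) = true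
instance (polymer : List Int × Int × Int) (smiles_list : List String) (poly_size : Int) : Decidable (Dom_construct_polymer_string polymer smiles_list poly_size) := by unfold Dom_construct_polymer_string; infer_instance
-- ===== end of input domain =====

-- ===== PORT A =====
-- B rebuilds one sequence cycle of SMILES pieces and repeats it with divmod instead of
-- A's per-monomer loop with a hand-tracked cycle counter (objective: simpler/alternative).

-- Python polymer[i] on the 3-tuple: indices 1,2,-1,-2 give the two monomer-index ints;
-- indices 0,-3 give the sequence LIST (which then raises TypeError when used as a list
-- index) and anything else raises IndexError -- both are `none` here.
def pvTuple3Get? (polymer : List Int × Int × Int) (i : Int) : Option Int :=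
  if i = 1 ∨ i = -2 then some polymer.2.1
  else if i = 2 ∨ i = -1 then some polymer.2.2
  else none

-- smiles_list[polymer[s + 1]] (shared by both ports; none = the Python raises)
def pvMonomerPiece? (polymer : List Int × Int × Int) (smiles_list : List String) (s : Int) : Option String :=
  (pvTuple3Get? polymer (s + 1)).bind (fun mi => PySem.List.pyGet? smiles_list mi)

-- one iteration of A's for-loop; state = some (poly_string, cycle), none = an exception was raised
def pvStepA (polymer : List Int × Int × Int) (smiles_list : List String)
    (st : Option (String × Int)) (i : Int) : Option (String × Int) :=
  match st with
  | none => none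
  | some (poly_string, cycle) =>
    let seq_cycle_location := i - cycle * PySem.List.len polymer.1
    match PySem.List.pyGet? polymer.1 seq_cycle_location with
    | none => none
    | some seq_monomer_index =>
      let cycle := if seq_cycle_location = PySem.List.len polymer.1 - 1 then cycle + 1 else cycle
      match pvMonomerPiece? polymer smiles_list seq_monomer_index with
      | none => none
      | some piece => some (poly_string ++ piece, cycle)

def construct_polymer_string (polymer : List Int × Int × Int) (smiles_list : List String) (poly_size : Int) : String :=
  match (PySem.List.pyRange 0 poly_size 1).foldl (pvStepA polymer smiles_list) (some ("" ++ "N", 0)) with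
  | some (poly_string, _) => poly_string ++ "N(=O)=O"
  | none => ""   -- A raised an exception here; excluded by Pre_

-- ===== PORT B =====
def construct_polymer_string_alt (polymer : List Int × Int × Int) (smiles_list : List String) (poly_size : Int) : String :=
  let seq := polymer.1
  let n : Int := if poly_size > 0 then poly_size else 0
  if n = 0 then
    "N" ++ "N(=O)=O"
  else
    match (PySem.List.slice seq (some 0) (some (min n (PySem.List.len seq)))).mapM
            (fun s => pvMonomerPiece? polymer smiles_list s) with
    | none => ""   -- the comprehension raised; excluded by Pre_
    | some pieces =>
      match PySem.Int.divmod? n (PySem.List.len seq) with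
      | none => ""   -- divmod(n, 0): ZeroDivisionError; excluded by Pre_
      | some (full, rem) =>
        let body := String.join (List.replicate full.toNat (String.join pieces))
                      ++ String.join (PySem.List.slice pieces none (some rem))
        "N" ++ body ++ "N(=O)=O"

-- ===== PRECONDITION & SPEC =====
-- Pre_ excludes exactly the inputs where A raises: poly_size > 0 with an empty sequence
-- (IndexError), a sequence value whose tuple lookup is not a usable int (IndexError/TypeError),
-- or a monomer index out of range of smiles_list (IndexError).
def Pre_construct_polymer_string (polymer : List Int × Int × Int) (smiles_list : List String) (poly_size : Int) : Prop :=
  poly_size ≤ 0 ∨ (polymer.1 ≠ [] ∧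
    ∀ s ∈ polymer.1.take (min poly_size.toNat polymer.1.length),
      (pvMonomerPiece? polymer smiles_list s).isSome = true)
instance (polymer : List Int × Int × Int) (smiles_list : List String) (poly_size : Int) : Decidable (Pre_construct_polymer_string polymer smiles_list poly_size) := by unfold Pre_construct_polymer_string; infer_instance

def pvWitness_construct_polymer_string : (List Int × Int × Int) × List String × Int :=
  (([0, 1], 0, 1), (["C", "O"], 3))

def Spec_construct_polymer_string (polymer : List Int × Int × Int) (smiles_list : List String) (poly_size : Int) (out : String) : Prop := out = construct_polymer_string_alt polymer smiles_list poly_size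
instance (polymer : List Int × Int × Int) (smiles_list : List String) (poly_size : Int) (out : String) : Decidable (Spec_construct_polymer_string polymer smiles_list poly_size out) := by unfold Spec_construct_polymer_string; infer_instance

-- ===== CLAIM (what is proved, stated in full; the proofs are below) =====
def Claim_equal_construct_polymer_string : Prop := ∀ (polymer : List Int × Int × Int) (smiles_list : List String) (poly_size : Int), Dom_construct_polymer_string polymer smiles_list poly_size → Pre_construct_polymer_string polymer smiles_list poly_size → Spec_construct_polymer_string polymer smiles_list poly_size (construct_polymer_string polymer smiles_list poly_size)

-- ===== LEMMAS AND PROOFS =====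

lemma pv_join_append (l1 l2 : List String) : String.join (l1 ++ l2) = String.join l1 ++ String.join l2 := by
  rw [← String.toList_inj]; simp

lemma pv_join_singleton (x : String) : String.join [x] = x := by
  rw [← String.toList_inj]; simp

lemma pv_append_empty (s : String) : s ++ "" = s := by
  rw [← String.toList_inj]; simp

lemma pv_empty_append (s : String) : "" ++ s = s := by
  rw [← String.toList_inj]; simp

-- successor step of n / L and n % L (drives A's cycle-counter invariant)
lemma pv_succ_divmod (L n : Nat) (hL : 0 < L) :
    ((n + 1) / L = if n % L = L - 1 then n / L + 1 else n / L) ∧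
    ((n + 1) % L = if n % L = L - 1 then 0 else n % L + 1) := by
  obtain ⟨q, r, hqr, hrL, hqdef, hrdef⟩ :
      ∃ q r, n = L * q + r ∧ r < L ∧ n / L = q ∧ n % L = r :=
    ⟨n / L, n % L, by rw [Nat.div_add_mod], Nat.mod_lt n hL, rfl, rfl⟩
  rw [hqdef, hrdef]
  by_cases hc : r = L - 1
  · have hn : n + 1 = L * (q + 1) := by
      have h1 : r + 1 = L := by omega
      calc n + 1 = L * q + (r + 1) := by omega
        _ = L * q + L := by rw [h1]
        _ = L * (q + 1) := by ring
    rw [if_pos hc, if_pos hc, hn, Nat.mul_div_cancel_left _ hL, Nat.mul_mod_right]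
    exact ⟨rfl, rfl⟩
  · have hlt : r + 1 < L := by omega
    have hn : n + 1 = L * q + (r + 1) := by omega
    rw [if_neg hc, if_neg hc, hn, Nat.mul_add_div hL, Nat.div_eq_of_lt hlt,
        Nat.mul_add_mod, Nat.mod_eq_of_lt hlt]
    omega

-- a list comprehension '[g(x) for x in l]' that may raise: mapM returns exactly the map of values
lemma pv_mapM_of_isSome {α β : Type} (p : α → Option β) (dflt : β) :
    ∀ l : List α, (∀ x ∈ l, (p x).isSome = true) →
      l.mapM p = some (l.map (fun x => (p x).getD dflt)) := by
  intro l h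
  induction l with
  | nil => rfl
  | cons x xs ih =>
    have hx := h x (by simp)
    obtain ⟨v, hv⟩ := Option.isSome_iff_exists.mp hx
    simp [List.mapM_cons, hv, ih (fun y hy => h y (by simp [hy]))]

-- l.take m, read off by index
lemma pv_take_map_eq_range_map {α β : Type} (g : α → β) (d : α) (l : List α) (m : Nat)
    (hm : m ≤ l.length) :
    (l.take m).map g = (List.range m).map (fun k => g (l.getD k d)) := by
  apply List.ext_getElem
  · simp; omega
  · intro i h1 h2
    simp at h1 h2 ⊢
    rw [List.getElem?_eq_getElem (by omega : i < l.length)]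
    rfl

-- splitting a modular body into full cycles plus a remainder
lemma pv_body_split (f : Nat → String) (L : Nat) (hL : 0 < L) (n : Nat) :
    String.join ((List.range n).map (fun j => f (j % L)))
      = String.join (List.replicate (n / L) (String.join ((List.range L).map f)))
        ++ String.join ((List.range (n % L)).map f) := by
  induction n with
  | zero => simp [Nat.zero_div, Nat.zero_mod]; rw [← String.toList_inj]; simp
  | succ n ih =>
    obtain ⟨hdiv, hmod⟩ := pv_succ_divmod L n hL
    rw [List.range_succ, List.map_append, pv_join_append, ih, List.map_singleton,
        pv_join_singleton, hdiv, hmod]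
    by_cases hc : n % L = L - 1
    · rw [if_pos hc, if_pos hc, List.range_zero, List.map_nil, List.replicate_succ',
          pv_join_append, pv_join_singleton, String.append_assoc]
      have h0 : String.join ([] : List String) = "" := rfl
      rw [h0, pv_append_empty]
      congr 1
      conv_rhs => rw [show L = (L - 1) + 1 by omega, List.range_succ, List.map_append,
        pv_join_append, List.map_singleton, pv_join_singleton]
      rw [hc]
    · rw [if_neg hc, if_neg hc, List.range_succ, List.map_append, pv_join_append,
        List.map_singleton, pv_join_singleton, String.append_assoc]

-- A's loop invariant: after n iterations the state is the joined pieces so far and cycle = n / L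
lemma pv_foldA_char (polymer : List Int × Int × Int) (smiles_list : List String) (N : Nat)
    (hL : 0 < polymer.1.length)
    (hvalid : ∀ k, k < min N polymer.1.length →
      (pvMonomerPiece? polymer smiles_list (polymer.1.getD k 0)).isSome = true)
    (s0 : String) :
    ∀ n, n ≤ N →
      (List.range n).foldl (fun st (j : Nat) => pvStepA polymer smiles_list st (j : Int)) (some (s0, 0))
        = some (s0 ++ String.join ((List.range n).map (fun j =>
            (pvMonomerPiece? polymer smiles_list (polymer.1.getD (j % polymer.1.length) 0)).getD "")),
            ((n / polymer.1.length : Nat) : Int)) := by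
  intro n hn
  induction n with
  | zero =>
    simp
    rw [show String.join ([] : List String) = "" from rfl, pv_append_empty]
  | succ n ih =>
    have hL' : 0 < polymer.1.length := hL
    set L := polymer.1.length with hLdef
    have hmodlt : n % L < L := Nat.mod_lt n hL'
    have hmodle : n % L ≤ n := Nat.mod_le n L
    have hklt : n % L < min N L := by omega
    have hv := hvalid (n % L) hklt
    obtain ⟨v, hv'⟩ := Option.isSome_iff_exists.mp hv
    obtain ⟨hdiv, _⟩ := pv_succ_divmod L n hL'
    rw [List.range_succ, List.foldl_append, ih (by omega)]
    simp only [List.foldl_cons, List.foldl_nil]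
    rw [pvStepA]
    have hscl : (n : Int) - ((n / L : Nat) : Int) * PySem.List.len polymer.1 = ((n % L : Nat) : Int) := by
      simp only [PySem.List.len_eq, ← hLdef]
      have h1 := congrArg (Nat.cast : Nat → Int) (Nat.div_add_mod n L)
      rw [Nat.cast_add, Nat.cast_mul] at h1
      linarith
    have hpg : PySem.List.pyGet? polymer.1 ((n % L : Nat) : Int)
          = some (polymer.1.getD (n % L) 0) := by
      rw [PySem.List.pyGet?_natCast, List.getElem?_eq_getElem hmodlt]
      rw [List.getD_eq_getElem _ _ hmodlt]
    rw [hscl, hpg]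
    simp only [hv', Option.some.injEq, Prod.mk.injEq]
    have hcond : (((n % L : Nat) : Int) = PySem.List.len polymer.1 - 1) ↔ (n % L = L - 1) := by
      simp only [PySem.List.len_eq, ← hLdef]
      omega
    constructor
    · rw [List.map_append, pv_join_append, List.map_singleton,
          pv_join_singleton, hv', Option.getD_some, String.append_assoc]
    · rw [hdiv]
      by_cases hc : n % L = L - 1
      · rw [if_pos (hcond.mpr hc), if_pos hc]; push_cast; ring
      · rw [if_neg (fun h => hc (hcond.mp h)), if_neg hc]

-- ===== VERDICT (by name: the statement is the Claim_ definition above) =====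
theorem construct_polymer_string_spec : Claim_equal_construct_polymer_string := by
  unfold Claim_equal_construct_polymer_string
  intro polymer smiles_list poly_size _ hpre
  unfold Spec_construct_polymer_string construct_polymer_string construct_polymer_string_alt
  by_cases hpos : poly_size ≤ 0
  · rw [PySem.List.pyRange_one_eq_nil (by omega)]
    simp only [List.foldl_nil, if_neg (by omega : ¬ poly_size > 0), if_true]
    rw [pv_empty_append]
  · have hpos' : 0 < poly_size := by omega
    rcases hpre with h0 | ⟨hne, hval⟩
    · omega
    have hL : 0 < polymer.1.length := List.length_pos_of_ne_nil hne
    have hps : poly_size = (poly_size.toNat : Int) := (Int.toNat_of_nonneg (by omega)).symm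
    have hvalid : ∀ k, k < min poly_size.toNat polymer.1.length →
        (pvMonomerPiece? polymer smiles_list (polymer.1.getD k 0)).isSome = true := by
      intro k hk
      have hkl : k < polymer.1.length := by omega
      refine hval _ ?_
      rw [List.getD_eq_getElem _ _ hkl]
      have hkt : k < (polymer.1.take (min poly_size.toNat polymer.1.length)).length := by
        simp; omega
      have he : (polymer.1.take (min poly_size.toNat polymer.1.length))[k] = polymer.1[k] :=
        List.getElem_take
      rw [← he]
      exact List.getElem_mem hkt
    rw [hps, PySem.List.pyRange_one]
    simp only [Int.sub_zero, Int.toNat_natCast, zero_add, List.foldl_map]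
    rw [pv_foldA_char polymer smiles_list poly_size.toNat hL hvalid ("" ++ "N")
        poly_size.toNat (le_refl _)]
    have hgt : ((poly_size.toNat : Int)) > 0 := by omega
    simp only [if_pos hgt]
    rw [if_neg (show ¬ ((poly_size.toNat : Int)) = 0 by omega)]
    rw [PySem.List.slice_toNat polymer.1 (le_refl 0)
        (by simp only [PySem.List.len_eq]; omega : (0:Int) ≤ min ((poly_size.toNat : Int)) (PySem.List.len polymer.1))]
    simp only [Int.toNat_zero, List.drop_zero, Nat.sub_zero]
    have hbtoNat : (min ((poly_size.toNat : Int)) (PySem.List.len polymer.1)).toNat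
        = min poly_size.toNat polymer.1.length := by
      simp only [PySem.List.len_eq]; omega
    rw [hbtoNat]
    rw [pv_mapM_of_isSome (fun s => pvMonomerPiece? polymer smiles_list s) "" _ hval]
    have hdm : PySem.Int.divmod? ((poly_size.toNat : Int)) (PySem.List.len polymer.1)
        = some (((poly_size.toNat / polymer.1.length : Nat) : Int),
                ((poly_size.toNat % polymer.1.length : Nat) : Int)) := by
      simp only [PySem.List.len_eq]
      simp [PySem.Int.divmod?]
      refine ⟨hne, ?_, ?_⟩
      · rw [Int.fdiv_eq_ediv]; omega
      · rw [Int.fmod_eq_emod]; omega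
    rw [hdm]
    rw [pv_take_map_eq_range_map (fun x => (pvMonomerPiece? polymer smiles_list x).getD "")
        (0 : Int) polymer.1 (min poly_size.toNat polymer.1.length) (by omega)]
    simp only [Int.toNat_natCast, PySem.List.slice_to_natCast]
    rw [pv_empty_append]
    have hbody := pv_body_split
      (fun k => (pvMonomerPiece? polymer smiles_list (polymer.1.getD k 0)).getD "")
      polymer.1.length hL poly_size.toNat
    rw [hbody]
    by_cases hcase : poly_size.toNat < polymer.1.length
    · have hmin : min poly_size.toNat polymer.1.length = poly_size.toNat := by omega
      have hdiv0 : poly_size.toNat / polymer.1.length = 0 := Nat.div_eq_of_lt hcase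
      have hmod : poly_size.toNat % polymer.1.length = poly_size.toNat := Nat.mod_eq_of_lt hcase
      rw [hmin, hdiv0, hmod]
      simp only [List.replicate_zero]
      rw [show String.join ([] : List String) = "" from rfl,
          List.take_of_length_le (by simp), pv_empty_append]
    · have hmin : min poly_size.toNat polymer.1.length = polymer.1.length := by omega
      have hmodlt : poly_size.toNat % polymer.1.length < polymer.1.length :=
        Nat.mod_lt _ hL
      rw [hmin, ← List.map_take, List.take_range, Nat.min_eq_left (by omega)]
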